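-- pv_equiv track=rewrite | github.com/EdwardStables/AoC | year_2021/day_05/task.py | interpolate_hv
-- ===== SOURCE A (Python) =====
-- def interpolate_hv(sx,sy,ex,ey):
--     if sx == ex: #vert
--         y_dir = 1 if ey > sy else -1
--         return [(sx,y) for y in range(sy, ey+y_dir,y_dir)]
--     elif sy == ey:
--         x_dir = 1 if ex > sx else -1
--         return [(x,sy) for x in range(sx, ex+x_dir,x_dir)]
--     else:
--         return []
-- ===== SOURCE B (Python) =====
-- def interpolate_hv(sx, sy, ex, ey):
--     if sx != ex and sy != ey:
--         return []
--     pts = []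
--     x, y = ex, ey
--     while (x, y) != (sx, sy):
--         pts.append((x, y))
--         if x != sx:
--             x += 1 if x < sx else -1
--         else:
--             y += 1 if y < sy else -1
--     pts.append((sx, sy))
--     pts.reverse()
--     return pts
-- ===== Notes on version B (the rewrite author's own statement) =====
-- stated objective: alternative
-- what changed: Instead of A's two per-axis range comprehensions, B walks backwards from the end point to the start point with a single while loop and an accumulator (appending each visited point, stepping one unit toward the start on whichever axis differs) and reverses the accumulator once at the end.
import Mathlib
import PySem

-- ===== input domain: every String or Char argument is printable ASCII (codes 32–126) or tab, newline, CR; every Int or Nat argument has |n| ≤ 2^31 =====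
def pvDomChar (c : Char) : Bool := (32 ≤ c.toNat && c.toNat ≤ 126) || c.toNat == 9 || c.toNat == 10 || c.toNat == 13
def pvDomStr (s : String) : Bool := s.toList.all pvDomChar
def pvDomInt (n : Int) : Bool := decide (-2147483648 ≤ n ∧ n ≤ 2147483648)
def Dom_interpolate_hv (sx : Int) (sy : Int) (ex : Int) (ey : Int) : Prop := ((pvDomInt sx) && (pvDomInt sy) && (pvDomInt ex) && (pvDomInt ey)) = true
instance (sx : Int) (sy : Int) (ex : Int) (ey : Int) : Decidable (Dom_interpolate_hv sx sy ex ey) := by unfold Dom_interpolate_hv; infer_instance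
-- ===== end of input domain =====

-- B builds the segment back-to-front: a single while loop walking from (ex,ey) to (sx,sy)
-- with an accumulator, reversed once at the end, instead of A's per-axis range comprehensions.


-- ===== PORT A =====
def interpolate_hv (sx : Int) (sy : Int) (ex : Int) (ey : Int) : List (Int × Int) :=
  if sx = ex then
    let y_dir : Int := if ey > sy then 1 else -1
    (PySem.List.pyRange sy (ey + y_dir) y_dir).map (fun y => (sx, y))
  else if sy = ey then
    let x_dir : Int := if ex > sx then 1 else -1
    (PySem.List.pyRange sx (ex + x_dir) x_dir).map (fun x => (x, sy))
  else
    []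

-- ===== PORT B =====
-- the while loop of Source B: walk (x,y) one unit toward (sx,sy), appending each point.
-- `fuel` is only a structural totalization guard; the caller passes enough for the walk.
def altWalk (fuel : Nat) (sx : Int) (sy : Int) (x : Int) (y : Int) (pts : List (Int × Int)) : List (Int × Int) :=
  match fuel with
  | 0 => pts
  | fuel + 1 =>
    if x = sx ∧ y = sy then pts ++ [(sx, sy)]
    else
      let pts' := pts ++ [(x, y)]
      if x ≠ sx then
        altWalk fuel sx sy (x + (if x < sx then 1 else -1)) y pts'
      else
        altWalk fuel sx sy x (y + (if y < sy then 1 else -1)) pts'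

def interpolate_hv_alt (sx : Int) (sy : Int) (ex : Int) (ey : Int) : List (Int × Int) :=
  if sx ≠ ex ∧ sy ≠ ey then []
  else (altWalk ((ex - sx).natAbs + (ey - sy).natAbs + 1) sx sy ex ey []).reverse

-- ===== PRECONDITION & SPEC =====
def Spec_interpolate_hv (sx : Int) (sy : Int) (ex : Int) (ey : Int) (out : List (Int × Int)) : Prop := out = interpolate_hv_alt sx sy ex ey
instance (sx : Int) (sy : Int) (ex : Int) (ey : Int) (out : List (Int × Int)) : Decidable (Spec_interpolate_hv sx sy ex ey out) := by unfold Spec_interpolate_hv; infer_instance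

-- ===== CLAIM (what is proved, stated in full; the proofs are below) =====
def Claim_equal_interpolate_hv : Prop := ∀ (sx : Int) (sy : Int) (ex : Int) (ey : Int), Dom_interpolate_hv sx sy ex ey → Spec_interpolate_hv sx sy ex ey (interpolate_hv sx sy ex ey)

-- ===== LEMMAS AND PROOFS =====

lemma walk_y_up (sx sy : Int) : ∀ (n : Nat) (f : Nat) (acc : List (Int × Int)),
    altWalk (n + f + 1) sx sy sx (sy + n) acc = acc ++ (List.range (n+1)).map (fun (k : Nat) => (sx, sy + (n : Int) - (k : Int))) := by
  intro n
  induction n with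
  | zero => intro f acc; rw [altWalk]; simp
  | succ n ih =>
    intro f acc
    rw [show n + 1 + f + 1 = (n + f + 1) + 1 from by omega, altWalk]
    rw [if_neg (show ¬(sx = sx ∧ sy + ((n+1 : Nat) : Int) = sy) from by push_cast; omega)]
    rw [if_neg (show ¬(sx ≠ sx) from by simp)]
    rw [if_neg (show ¬(sy + ((n+1 : Nat) : Int) < sy) from by push_cast; omega)]
    rw [show sy + ((n+1 : Nat) : Int) + -1 = sy + (n : Int) from by push_cast; ring, ih]
    conv_rhs => rw [List.range_succ_eq_map, List.map_cons, List.map_map]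
    simp only [List.append_assoc, List.singleton_append]
    refine congrArg _ (congrArg₂ List.cons ?_ ?_)
    · simp
    · refine List.map_congr_left (fun k _ => ?_)
      simp only [Function.comp, Prod.ext_iff]
      constructor <;> push_cast <;> omega

lemma walk_y_down (sx sy : Int) : ∀ (n : Nat) (f : Nat) (acc : List (Int × Int)),
    altWalk (n + f + 1) sx sy sx (sy - n) acc = acc ++ (List.range (n+1)).map (fun (k : Nat) => (sx, sy - (n : Int) + (k : Int))) := by
  intro n
  induction n with
  | zero => intro f acc; rw [altWalk]; simp
  | succ n ih =>
    intro f acc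
    rw [show n + 1 + f + 1 = (n + f + 1) + 1 from by omega, altWalk]
    rw [if_neg (show ¬(sx = sx ∧ sy - ((n+1 : Nat) : Int) = sy) from by push_cast; omega)]
    rw [if_neg (show ¬(sx ≠ sx) from by simp)]
    rw [if_pos (show sy - ((n+1 : Nat) : Int) < sy from by push_cast; omega)]
    rw [show sy - ((n+1 : Nat) : Int) + 1 = sy - (n : Int) from by push_cast; ring, ih]
    conv_rhs => rw [List.range_succ_eq_map, List.map_cons, List.map_map]
    simp only [List.append_assoc, List.singleton_append]
    refine congrArg _ (congrArg₂ List.cons ?_ ?_)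
    · simp
    · refine List.map_congr_left (fun k _ => ?_)
      simp only [Function.comp, Prod.ext_iff]
      constructor <;> push_cast <;> omega

lemma walk_x_right (sx sy : Int) : ∀ (n : Nat) (f : Nat) (acc : List (Int × Int)),
    altWalk (n + f + 1) sx sy (sx + n) sy acc = acc ++ (List.range (n+1)).map (fun (k : Nat) => (sx + (n : Int) - (k : Int), sy)) := by
  intro n
  induction n with
  | zero => intro f acc; rw [altWalk]; simp
  | succ n ih =>
    intro f acc
    rw [show n + 1 + f + 1 = (n + f + 1) + 1 from by omega, altWalk]
    rw [if_neg (show ¬(sx + ((n+1 : Nat) : Int) = sx ∧ sy = sy) from by push_cast; omega)]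
    rw [if_pos (show sx + ((n+1 : Nat) : Int) ≠ sx from by push_cast; omega)]
    rw [if_neg (show ¬(sx + ((n+1 : Nat) : Int) < sx) from by push_cast; omega)]
    rw [show sx + ((n+1 : Nat) : Int) + -1 = sx + (n : Int) from by push_cast; ring, ih]
    conv_rhs => rw [List.range_succ_eq_map, List.map_cons, List.map_map]
    simp only [List.append_assoc, List.singleton_append]
    refine congrArg _ (congrArg₂ List.cons ?_ ?_)
    · simp
    · refine List.map_congr_left (fun k _ => ?_)
      simp only [Function.comp, Prod.ext_iff]
      constructor <;> push_cast <;> omega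

lemma walk_x_left (sx sy : Int) : ∀ (n : Nat) (f : Nat) (acc : List (Int × Int)),
    altWalk (n + f + 1) sx sy (sx - n) sy acc = acc ++ (List.range (n+1)).map (fun (k : Nat) => (sx - (n : Int) + (k : Int), sy)) := by
  intro n
  induction n with
  | zero => intro f acc; rw [altWalk]; simp
  | succ n ih =>
    intro f acc
    rw [show n + 1 + f + 1 = (n + f + 1) + 1 from by omega, altWalk]
    rw [if_neg (show ¬(sx - ((n+1 : Nat) : Int) = sx ∧ sy = sy) from by push_cast; omega)]
    rw [if_pos (show sx - ((n+1 : Nat) : Int) ≠ sx from by push_cast; omega)]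
    rw [if_pos (show sx - ((n+1 : Nat) : Int) < sx from by push_cast; omega)]
    rw [show sx - ((n+1 : Nat) : Int) + 1 = sx - (n : Int) from by push_cast; ring, ih]
    conv_rhs => rw [List.range_succ_eq_map, List.map_cons, List.map_map]
    simp only [List.append_assoc, List.singleton_append]
    refine congrArg _ (congrArg₂ List.cons ?_ ?_)
    · simp
    · refine List.map_congr_left (fun k _ => ?_)
      simp only [Function.comp, Prod.ext_iff]
      constructor <;> push_cast <;> omega

lemma rev_map_range {α : Type} (f : Nat → α) : ∀ (n : Nat),
    ((List.range (n+1)).map f).reverse = (List.range (n+1)).map (fun k => f (n - k)) := by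
  intro n
  induction n with
  | zero => simp
  | succ n ih =>
    conv_rhs => rw [List.range_succ_eq_map, List.map_cons, List.map_map]
    rw [List.range_succ, List.map_append, List.reverse_append]
    simp only [List.map_cons, List.map_nil, List.reverse_cons, List.reverse_nil,
      List.nil_append, List.singleton_append]
    rw [ih]
    refine congrArg₂ List.cons (by simp) ?_
    refine List.map_congr_left (fun k hk => ?_)
    have hk' : k < n + 1 := List.mem_range.mp hk
    simp only [Function.comp]
    congr 1
    omega

-- ===== VERDICT (by name: the statement is the Claim_ definition above) =====
theorem interpolate_hv_spec : Claim_equal_interpolate_hv := by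
  intro sx sy ex ey _
  unfold Spec_interpolate_hv interpolate_hv interpolate_hv_alt
  rcases lt_trichotomy sx ex with hx | hx | hx <;>
    rcases lt_trichotomy sy ey with hy | hy | hy
  -- sx < ex, sy < ey : diagonal, both []
  · simp [ne_of_lt hx, ne_of_lt hy, lt_asymm hx]
  -- sx < ex, sy = ey : horizontal rightwards
  · subst hy
    obtain ⟨n, hn⟩ : ∃ n : Nat, ex = sx + n := ⟨(ex - sx).toNat, by omega⟩
    subst hn
    norm_num [ne_of_lt hx, lt_asymm hx, gt_iff_lt, hx]
    rw [show n + 1 = n + 0 + 1 from rfl, walk_x_right sx sy n 0 [], List.nil_append, rev_map_range, PySem.List.pyRange_one, List.map_map]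
    rw [show (sx + n + 1 - sx).toNat = n + 1 from by omega]
    refine List.map_congr_left (fun k hk => ?_)
    have hk' : k < n + 1 := List.mem_range.mp hk
    simp only [Function.comp, Prod.ext_iff]
    constructor <;> push_cast <;> omega
  -- sx < ex, ey < sy : diagonal
  · simp [ne_of_lt hx, (ne_of_lt hy).symm, lt_asymm hx]
  -- sx = ex, sy < ey : vertical upwards
  · subst hx
    obtain ⟨n, hn⟩ : ∃ n : Nat, ey = sy + n := ⟨(ey - sy).toNat, by omega⟩
    subst hn
    norm_num [ne_of_lt hy, lt_asymm hy, gt_iff_lt, hy]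
    rw [show n + 1 = n + 0 + 1 from rfl, walk_y_up sx sy n 0 [], List.nil_append, rev_map_range, PySem.List.pyRange_one, List.map_map]
    rw [show (sy + n + 1 - sy).toNat = n + 1 from by omega]
    refine List.map_congr_left (fun k hk => ?_)
    have hk' : k < n + 1 := List.mem_range.mp hk
    simp only [Function.comp, Prod.ext_iff]
    constructor <;> push_cast <;> omega
  -- sx = ex, sy = ey : single point
  · subst hx; subst hy
    rw [if_pos rfl, show (sx - sx).natAbs + (sy - sy).natAbs + 1 = 1 from by omega, altWalk,
      if_pos (show sx = sx ∧ sy = sy from ⟨rfl, rfl⟩)]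
    simp [PySem.List.pyRange_neg_one, List.range_succ,
      show (sy - (sy + -1)).toNat = 1 from by omega]
  -- sx = ex, ey < sy : vertical downwards
  · subst hx
    obtain ⟨n, hn⟩ : ∃ n : Nat, ey = sy - n := ⟨(sy - ey).toNat, by omega⟩
    subst hn
    norm_num [(ne_of_lt hy).symm, lt_asymm hy, gt_iff_lt, hy]
    rw [show n + 1 = n + 0 + 1 from rfl, walk_y_down sx sy n 0 [], List.nil_append, rev_map_range, PySem.List.pyRange_neg_one, List.map_map]
    rw [show (sy - (sy - n + -1)).toNat = n + 1 from by omega]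
    refine List.map_congr_left (fun k hk => ?_)
    have hk' : k < n + 1 := List.mem_range.mp hk
    simp only [Function.comp, Prod.ext_iff]
    constructor <;> push_cast <;> omega
  -- ex < sx, sy < ey : diagonal
  · simp [(ne_of_lt hx).symm, ne_of_lt hy, lt_asymm hy]
  -- ex < sx, sy = ey : horizontal leftwards
  · subst hy
    obtain ⟨n, hn⟩ : ∃ n : Nat, ex = sx - n := ⟨(sx - ex).toNat, by omega⟩
    subst hn
    norm_num [(ne_of_lt hx).symm, lt_asymm hx, gt_iff_lt, hx]
    rw [show n + 1 = n + 0 + 1 from rfl, walk_x_left sx sy n 0 [], List.nil_append, rev_map_range, PySem.List.pyRange_neg_one, List.map_map]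
    rw [show (sx - (sx - n + -1)).toNat = n + 1 from by omega]
    refine List.map_congr_left (fun k hk => ?_)
    have hk' : k < n + 1 := List.mem_range.mp hk
    simp only [Function.comp, Prod.ext_iff]
    constructor <;> push_cast <;> omega
  -- ex < sx, ey < sy : diagonal
  · simp [(ne_of_lt hx).symm, (ne_of_lt hy).symm, lt_asymm hy]
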